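-- pv_equiv track=rewrite | github.com/vdpham326/python-data-structures | sets/count_states.py | count_states
-- ===== SOURCE A (Python) =====
-- def count_states(moves):
--     current_state = (5, 5)
--     past_levels = {(5, 5)}
--
--     #iterate through the list moves
--     for move in moves:
--         x, y = current_state
--         if move == 1:
--             current_state = (min(x + 1, 10), y)
--         if move == 2:
--             if x > 0 and y < 10:
--                 current_state = (x - 1, y + 1)
--             else:
--                 current_state = (x, y)
--         if move == 3:
--             current_state = (x, max(y - 1, 0))
--
--         if current_state in past_levels:
--             return len(past_levels)
--         else:
--             past_levels.add(current_state)
--     return -1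
-- ===== SOURCE B (Python) =====
-- def step(state, move):
--     x, y = state
--     if move == 1:
--         return (min(x + 1, 10), y)
--     elif move == 2:
--         return (x - 1, y + 1) if x > 0 and y < 10 else (x, y)
--     elif move == 3:
--         return (x, max(y - 1, 0))
--     else:
--         return state
--
--
-- def count_states(moves):
--     # pass 1: build the whole trajectory of states
--     states = [(5, 5)]
--     for m in moves:
--         states.append(step(states[-1], m))
--     # pass 2: scan for the first repeat with an initially-empty seen set
--     seen = set()
--     for s in states:
--         if s in seen:
--             return len(seen)
--         seen.add(s)
--     return -1
-- ===== Notes on version B (the rewrite author's own statement) =====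
-- stated objective: alternative
-- what changed: Move application is factored into a pure step function, the full trajectory is built in one pass, and a second pass scans it with an initially-empty seen set, instead of A's single loop interleaving three sequential if-statements with the repeat check.
import Mathlib
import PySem

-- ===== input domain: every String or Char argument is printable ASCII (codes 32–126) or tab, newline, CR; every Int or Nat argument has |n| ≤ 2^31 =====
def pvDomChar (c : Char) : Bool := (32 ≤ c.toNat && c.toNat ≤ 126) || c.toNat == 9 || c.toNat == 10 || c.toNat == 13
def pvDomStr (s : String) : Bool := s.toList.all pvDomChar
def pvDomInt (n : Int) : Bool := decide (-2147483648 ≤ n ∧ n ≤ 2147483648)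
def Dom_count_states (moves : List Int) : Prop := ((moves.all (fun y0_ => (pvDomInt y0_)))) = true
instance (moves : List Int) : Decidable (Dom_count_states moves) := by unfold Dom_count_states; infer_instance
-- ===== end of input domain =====

-- B builds the trajectory with a pure step function and scans it in a second pass;
-- objective: alternative decomposition (same O(n) cost).

-- ===== PORT A =====
-- A's loop: three sequential ifs on move (each reading the x, y bound at loop top),
-- then the repeat check against the set.
def countStatesLoopA : List Int → Int × Int → PySem.Set (Int × Int) → Int
  | [], _, _ => -1
  | m :: ms, cur, past =>
    let x := cur.1
    let y := cur.2
    let c1 := if m == 1 then (min (x + 1) 10, y) else cur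
    let c2 := if m == 2 then (if x > 0 && y < 10 then (x - 1, y + 1) else (x, y)) else c1
    let c3 := if m == 3 then (x, max (y - 1) 0) else c2
    if PySem.Set.contains past c3 then (PySem.Set.len past : Int)
    else countStatesLoopA ms c3 (PySem.Set.add past c3)

def count_states (moves : List Int) : Int :=
  countStatesLoopA moves (5, 5) (PySem.Set.ofList [(5, 5)])

-- ===== PORT B =====
def stepAlt (state : Int × Int) (move : Int) : Int × Int :=
  if move == 1 then (min (state.1 + 1) 10, state.2)
  else if move == 2 then
    (if state.1 > 0 && state.2 < 10 then (state.1 - 1, state.2 + 1) else (state.1, state.2))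
  else if move == 3 then (state.1, max (state.2 - 1) 0)
  else state

-- pass 1: the trajectory after the initial state (Source B's append loop)
def trajAlt : Int × Int → List Int → List (Int × Int)
  | _, [] => []
  | cur, m :: ms => stepAlt cur m :: trajAlt (stepAlt cur m) ms

-- pass 2: scan with an initially-empty seen set
def scanAlt : List (Int × Int) → PySem.Set (Int × Int) → Int
  | [], _ => -1
  | s :: rest, seen =>
    if PySem.Set.contains seen s then (PySem.Set.len seen : Int)
    else scanAlt rest (PySem.Set.add seen s)

def count_states_alt (moves : List Int) : Int :=
  scanAlt ((5, 5) :: trajAlt (5, 5) moves) PySem.Set.empty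

-- ===== PRECONDITION & SPEC =====
def Spec_count_states (moves : List Int) (out : Int) : Prop := out = count_states_alt moves
instance (moves : List Int) (out : Int) : Decidable (Spec_count_states moves out) := by
  unfold Spec_count_states; infer_instance

-- ===== CLAIM (what is proved, stated in full; the proofs are below) =====
def Claim_equal_count_states : Prop :=
  ∀ (moves : List Int), Dom_count_states moves → Spec_count_states moves (count_states moves)

-- ===== LEMMAS AND PROOFS =====

-- A's three sequential ifs compute exactly B's step function.
theorem stepA_eq_stepAlt (cur : Int × Int) (m : Int) :
    (let x := cur.1
     let y := cur.2
     let c1 := if m == 1 then (min (x + 1) 10, y) else cur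
     let c2 := if m == 2 then (if x > 0 && y < 10 then (x - 1, y + 1) else (x, y)) else c1
     if m == 3 then (x, max (y - 1) 0) else c2) = stepAlt cur m := by
  simp only [stepAlt]
  by_cases h1 : m == 1 <;> by_cases h2 : m == 2 <;> by_cases h3 : m == 3 <;>
    simp_all

-- A's fused loop equals B's build-then-scan on the same state and set.
theorem loopA_eq_scan (ms : List Int) (cur : Int × Int) (past : PySem.Set (Int × Int)) :
    countStatesLoopA ms cur past = scanAlt (trajAlt cur ms) past := by
  induction ms generalizing cur past with
  | nil => rfl
  | cons m rest ih =>
    simp only [countStatesLoopA, trajAlt, scanAlt, stepA_eq_stepAlt cur m]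
    split <;> simp [ih]

-- ===== VERDICT (by name: the statement is the Claim_ definition above) =====
theorem count_states_spec : Claim_equal_count_states := by
  intro moves _
  unfold Spec_count_states count_states count_states_alt
  rw [loopA_eq_scan]
  rfl
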